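-- pv_equiv track=rewrite | github.com/CostaLautaroGithub/sintaxis | lexer.py | automata_abrir_llave
-- ===== SOURCE A (Python) =====
-- ESTADO_TRAMPA = "TRAMPA"
--
-- ESTADO_FINAL = "ACEPTADO"
--
-- ESTADO_NO_FINAL = "NO ACEPTADO"
--
-- def automata_abrir_llave(cadena):
--     simbolos = ["{"]
--     estado_actual = 0
--     estados_finales = [1]
--
--     for caracter in cadena:
--         if estado_actual == 0 and caracter in simbolos:
--           estado_actual = 1
--         else:
--             estado_actual = -1
--             break
--
--     if estado_actual == -1:
--       return ESTADO_TRAMPA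
--
--
--     if estado_actual in estados_finales:
--      return ESTADO_FINAL
--     else:
--                 return ESTADO_NO_FINAL
-- ===== SOURCE B (Python) =====
-- ESTADO_TRAMPA = "TRAMPA"
--
-- ESTADO_FINAL = "ACEPTADO"
--
-- ESTADO_NO_FINAL = "NO ACEPTADO"
--
-- def automata_abrir_llave(cadena):
--     # Closed-form classification: the one-state automaton accepts exactly "{",
--     # the empty string stays in the (non-final) start state, everything else traps.
--     if cadena == "{":
--         return ESTADO_FINAL
--     if cadena == "":
--         return ESTADO_NO_FINAL
--     return ESTADO_TRAMPA
-- ===== Notes on version B (the rewrite author's own statement) =====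
-- stated objective: simpler
-- what changed: Replaced the per-character DFA simulation loop with a closed-form classification by three direct string comparisons.
import Mathlib
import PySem

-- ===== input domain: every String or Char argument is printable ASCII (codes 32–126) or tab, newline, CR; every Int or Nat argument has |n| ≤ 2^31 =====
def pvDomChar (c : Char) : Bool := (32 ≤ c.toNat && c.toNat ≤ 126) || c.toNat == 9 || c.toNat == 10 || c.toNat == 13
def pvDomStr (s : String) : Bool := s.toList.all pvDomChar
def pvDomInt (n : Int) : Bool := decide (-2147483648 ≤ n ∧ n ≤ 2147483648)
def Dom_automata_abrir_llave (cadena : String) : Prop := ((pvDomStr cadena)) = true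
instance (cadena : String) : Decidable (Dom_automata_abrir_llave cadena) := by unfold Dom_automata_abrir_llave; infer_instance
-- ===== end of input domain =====

-- B replaces the per-character DFA loop with a closed-form three-way string comparison (objective: simpler).


-- ===== PORT A =====
-- the for-loop with break: recursion over the character list carrying estado_actual
def automataLoopA : List Char → Int → Int
  | [], estado => estado
  | c :: cs, estado =>
      if estado = 0 ∧ c ∈ ['{'] then automataLoopA cs 1
      else -1  -- break

def automata_abrir_llave (cadena : String) : String :=
  let estado := automataLoopA cadena.toList 0
  if estado = -1 then "TRAMPA"
  else if estado ∈ ([1] : List Int) then "ACEPTADO"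
  else "NO ACEPTADO"

-- ===== PORT B =====
def automata_abrir_llave_alt (cadena : String) : String :=
  if cadena = "{" then "ACEPTADO"
  else if cadena = "" then "NO ACEPTADO"
  else "TRAMPA"

-- ===== PRECONDITION & SPEC =====
def Spec_automata_abrir_llave (cadena : String) (out : String) : Prop := out = automata_abrir_llave_alt cadena
instance (cadena : String) (out : String) : Decidable (Spec_automata_abrir_llave cadena out) := by unfold Spec_automata_abrir_llave; infer_instance

-- ===== CLAIM (what is proved, stated in full; the proofs are below) =====
def Claim_equal_automata_abrir_llave : Prop := ∀ (cadena : String), Dom_automata_abrir_llave cadena → Spec_automata_abrir_llave cadena (automata_abrir_llave cadena)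

-- ===== LEMMAS AND PROOFS =====
theorem automata_eq_of_list (l : List Char) :
    (let estado := automataLoopA l 0
     if estado = -1 then "TRAMPA"
     else if estado ∈ ([1] : List Int) then "ACEPTADO"
     else "NO ACEPTADO")
    = (if l = ['{'] then "ACEPTADO" else if l = [] then "NO ACEPTADO" else "TRAMPA") := by
  match l with
  | [] => simp [automataLoopA]
  | [c] =>
      by_cases h : c = '{' <;> simp [automataLoopA, h]
  | c :: d :: rest =>
      by_cases h : c = '{' <;> simp [automataLoopA, h]

-- ===== VERDICT (by name: the statement is the Claim_ definition above) =====
theorem automata_abrir_llave_spec : Claim_equal_automata_abrir_llave := by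
  intro cadena _
  unfold Spec_automata_abrir_llave automata_abrir_llave automata_abrir_llave_alt
  have h := automata_eq_of_list cadena.toList
  have h1 : (cadena = "{") ↔ cadena.toList = ['{'] := by
    constructor
    · intro e; simp [e]
    · intro e; exact String.toList_injective (by simp [e])
  have h2 : (cadena = "") ↔ cadena.toList = [] := by
    constructor
    · intro e; simp [e]
    · intro e; exact String.toList_injective (by simp [e])
  simp only [h, h1, h2]
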